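-- pv_equiv track=rewrite | github.com/Total-Conversion/Bk2MapCreator | main.py | find_sequence_indices
-- ===== SOURCE A (Python) =====
-- def find_sequence_indices(lst, sequence):
--     seq_len = len(sequence)
--     first_index = -1
--     next_index = -1
--
--     for i in range(len(lst) - seq_len + 1):
--         if lst[i:i+seq_len] == sequence:
--             if first_index == -1:
--                 first_index = i
--             next_index = i + seq_len
--             break
--
--     return first_index, next_index
-- ===== SOURCE B (Python) =====
-- def find_sequence_indices(lst, sequence):
--     # Column-wise candidate filtering: keep every start position whose j-th
--     # element matches sequence[j]; the first surviving candidate is the answer.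
--     cand = list(range(len(lst) - len(sequence) + 1))
--     for j, v in enumerate(sequence):
--         cand = [p for p in cand if lst[p + j] == v]
--         if not cand:
--             break
--     if cand:
--         return cand[0], cand[0] + len(sequence)
--     return -1, -1
-- ===== Notes on version B (the rewrite author's own statement) =====
-- stated objective: alternative
-- what changed: Row-wise naive scan (compare the whole window slice at each start index, break on first hit) replaced by column-wise candidate filtering: keep the list of all feasible start positions and, for each offset j of the pattern, filter out the candidates whose j-th element differs; the first surviving candidate is the match.
import Mathlib
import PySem

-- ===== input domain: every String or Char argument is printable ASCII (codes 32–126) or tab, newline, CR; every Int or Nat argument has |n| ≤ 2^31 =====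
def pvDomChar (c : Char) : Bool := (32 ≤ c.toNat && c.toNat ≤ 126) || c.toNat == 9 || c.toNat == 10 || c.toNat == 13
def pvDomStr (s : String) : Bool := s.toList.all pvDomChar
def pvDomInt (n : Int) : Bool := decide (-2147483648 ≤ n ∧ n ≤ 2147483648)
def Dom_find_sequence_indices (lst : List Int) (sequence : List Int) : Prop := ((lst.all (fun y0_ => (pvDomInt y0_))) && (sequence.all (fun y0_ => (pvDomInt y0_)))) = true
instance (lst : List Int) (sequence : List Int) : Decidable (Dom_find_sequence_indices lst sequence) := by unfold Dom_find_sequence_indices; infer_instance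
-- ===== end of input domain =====

-- B replaces A's row-wise window scan by column-wise filtering of a candidate list (alternative algorithm, same cost).

-- ===== PORT A =====
-- the for-loop with break and the (first_index, next_index) state, literally
def pvALoop (lst sequence : List Int) (m : Int) (first next : Int) : List Int → Int × Int
  | [] => (first, next)
  | i :: rest =>
    if PySem.List.slice lst (some i) (some (i + m)) = sequence then
      ((if first = -1 then i else first), i + m)
    else pvALoop lst sequence m first next rest

def find_sequence_indices (lst : List Int) (sequence : List Int) : Int × Int :=
  let seq_len : Int := sequence.length
  pvALoop lst sequence seq_len (-1) (-1)
    (PySem.List.pyRange 0 ((lst.length : Int) - seq_len + 1) 1)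

-- ===== PORT B =====
-- 'for j, v in enumerate(sequence): cand = [p for p in cand if lst[p+j] == v]; if not cand: break'
def pvBLoop (lst : List Int) : List (Int × Int) → List Int → List Int
  | [], cand => cand
  | (j, v) :: rest, cand =>
    let cand' := cand.filter (fun p => PySem.List.pyGet? lst (p + j) == some v)
    if cand' = [] then cand' else pvBLoop lst rest cand'

def find_sequence_indices_alt (lst : List Int) (sequence : List Int) : Int × Int :=
  let cand0 := PySem.List.pyRange 0 ((lst.length : Int) - sequence.length + 1) 1
  let cand := pvBLoop lst (PySem.List.enumerate sequence 0) cand0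
  match cand with
  | [] => (-1, -1)
  | c :: _ => (c, c + (sequence.length : Int))

-- ===== PRECONDITION & SPEC =====
def Spec_find_sequence_indices (lst : List Int) (sequence : List Int) (out : Int × Int) : Prop := out = find_sequence_indices_alt lst sequence
instance (lst : List Int) (sequence : List Int) (out : Int × Int) : Decidable (Spec_find_sequence_indices lst sequence out) := by unfold Spec_find_sequence_indices; infer_instance

-- ===== CLAIM (what is proved, stated in full; the proofs are below) =====
def Claim_equal_find_sequence_indices : Prop := ∀ (lst : List Int) (sequence : List Int), Dom_find_sequence_indices lst sequence → Spec_find_sequence_indices lst sequence (find_sequence_indices lst sequence)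

-- ===== LEMMAS AND PROOFS =====

-- element-wise window match at (integer) start position q
def pvMatchesAt (lst : List Int) (q : Int) : List Int → Bool
  | [] => true
  | v :: rest => (PySem.List.pyGet? lst q == some v) && pvMatchesAt lst (q + 1) rest

theorem pvALoop_eq_find? (lst sequence : List Int) (m : Int) (L : List Int) :
    pvALoop lst sequence m (-1) (-1) L =
      match L.find? (fun i => decide (PySem.List.slice lst (some i) (some (i + m)) = sequence)) with
      | some i => (i, i + m)
      | none => (-1, -1) := by
  induction L with
  | nil => rfl
  | cons i rest ih =>
    by_cases h : PySem.List.slice lst (some i) (some (i + m)) = sequence <;>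
      simp [pvALoop, List.find?, h, ih]

theorem pvBLoop_eq_filter (lst : List Int) (s : List Int) :
    ∀ (j : Int) (cand : List Int),
      pvBLoop lst (PySem.List.enumerate s j) cand =
        cand.filter (fun p => pvMatchesAt lst (p + j) s) := by
  induction s with
  | nil => intro j cand; simp [PySem.List.enumerate_nil, pvBLoop, pvMatchesAt]
  | cons v rest ih =>
    intro j cand
    rw [PySem.List.enumerate_cons]
    show (if _ = [] then _ else pvBLoop lst (PySem.List.enumerate rest (j+1)) _) = _
    rw [ih]
    have hff : ∀ (c : List Int),
        (c.filter (fun p => PySem.List.pyGet? lst (p + j) == some v)).filter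
            (fun p => pvMatchesAt lst (p + (j + 1)) rest)
          = c.filter (fun p => pvMatchesAt lst (p + j) (v :: rest)) := by
      intro c
      rw [List.filter_filter]
      apply List.filter_congr
      intro p _
      show (pvMatchesAt lst (p + (j+1)) rest && (PySem.List.pyGet? lst (p + j) == some v)) = _
      show _ = ((PySem.List.pyGet? lst (p + j) == some v) && pvMatchesAt lst (p + j + 1) rest)
      rw [Bool.and_comm]
      congr 2
      ring_nf
    by_cases h : cand.filter (fun p => PySem.List.pyGet? lst (p + j) == some v) = []
    · simp only [h]
      rw [← hff cand, h]
      simp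
    · simp only [if_neg h]
      exact hff cand

theorem pvMatchesAt_iff_slice (lst : List Int) (s : List Int) :
    ∀ (p : Int), 0 ≤ p →
      (pvMatchesAt lst p s = true ↔
        PySem.List.slice lst (some p) (some (p + s.length)) = s) := by
  induction s with
  | nil =>
    intro p hp
    rw [PySem.List.slice_toNat _ hp (by simpa using hp)]
    simp [pvMatchesAt]
  | cons v rest ih =>
    intro p hp
    have hlen : (0:Int) ≤ p + ((v :: rest).length : Int) := by
      have : (0:Int) ≤ ((v :: rest).length : Int) := by exact_mod_cast Nat.zero_le _
      omega
    have htn : (p + ((v :: rest).length : Int)).toNat - p.toNat = rest.length + 1 := by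
      simp only [List.length_cons]
      omega
    rw [PySem.List.slice_toNat _ hp hlen, htn]
    have hg : PySem.List.pyGet? lst p = (lst.drop p.toNat)[0]? := by
      rw [PySem.List.pyGet?_of_nonneg lst hp]
      simp [List.getElem?_drop]
    have hr0 : (0:Int) ≤ (rest.length : Int) := by exact_mod_cast Nat.zero_le rest.length
    have hg1 : (pvMatchesAt lst (p + 1) rest = true) ↔
        (lst.drop (p.toNat + 1)).take rest.length = rest := by
      rw [ih (p + 1) (by omega), PySem.List.slice_toNat _ (by omega) (by omega)]
      have h1 : (p + 1).toNat = p.toNat + 1 := by omega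
      rw [h1]
      have h2 : (p + 1 + (rest.length : Int)).toNat - (p.toNat + 1) = rest.length := by omega
      rw [h2]
    cases hdrop : lst.drop p.toNat with
    | nil =>
      simp [pvMatchesAt, hg, hdrop]
    | cons x xs =>
      have hxs : lst.drop (p.toNat + 1) = xs := by
        simp [List.drop_add_one_eq_tail_drop, hdrop]
      simp only [pvMatchesAt, hg, hdrop, List.take_succ_cons, Bool.and_eq_true, beq_iff_eq,
        Option.some.injEq, List.getElem?_cons_zero, List.cons.injEq]
      rw [hg1, hxs]

theorem find_sequence_indices_spec : Claim_equal_find_sequence_indices := by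
  unfold Claim_equal_find_sequence_indices
  intro lst sequence _
  unfold Spec_find_sequence_indices find_sequence_indices find_sequence_indices_alt
  dsimp only
  rw [pvALoop_eq_find?, pvBLoop_eq_filter, ← List.head?_filter]
  have hcongr : (PySem.List.pyRange 0 ((lst.length : Int) - sequence.length + 1) 1).filter
        (fun i => decide (PySem.List.slice lst (some i) (some (i + sequence.length)) = sequence))
      = (PySem.List.pyRange 0 ((lst.length : Int) - sequence.length + 1) 1).filter
        (fun p => pvMatchesAt lst (p + 0) sequence) := by
    apply List.filter_congr
    intro p hp
    have hp0 : 0 ≤ p := ((PySem.List.mem_pyRange_one).mp hp).1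
    simp only [add_zero]
    rw [Bool.eq_iff_iff, decide_eq_true_iff, pvMatchesAt_iff_slice lst sequence p hp0]
  rw [hcongr]
  cases h : ((PySem.List.pyRange 0 ((lst.length : Int) - sequence.length + 1) 1).filter
      (fun p => pvMatchesAt lst (p + 0) sequence)) <;> simp
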